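-- pv_equiv track=rewrite | github.com/Peter200lx/advent-of-code | 2015/day25.py | gen_fields
-- ===== SOURCE A (Python) =====
-- MULTIPLY_BY = 252533
--
-- MOD_BY = 33554393
--
-- def gen_fields(start_num: int, target_row: int = 1, target_column: int = 1) -> int:
--     row = column = 1
--     cur_num = start_num
--     while True:
--         if row == 1:
--             column, row = 1, column + 1
--         else:
--             column += 1
--             row -= 1
--         cur_num = (cur_num * MULTIPLY_BY) % MOD_BY
--         if row == target_row and column == target_column:
--             return cur_num
-- ===== SOURCE B (Python) =====
-- MULTIPLY_BY = 252533
--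
-- MOD_BY = 33554393
--
--
-- def gen_fields(start_num: int, target_row: int = 1, target_column: int = 1) -> int:
--     d = target_row + target_column - 2
--     steps = d * (d + 1) // 2 + target_column - 1
--     return (start_num * pow(MULTIPLY_BY, steps, MOD_BY)) % MOD_BY
-- ===== Notes on version B (the rewrite author's own statement) =====
-- stated objective: faster
-- what changed: Replaces the step-by-step diagonal walk with one modular multiply per visited cell by a closed-form triangular-number index of the target cell plus a single three-argument pow (modular exponentiation); Pre_ excludes only inputs on which A loops forever (target row/column < 1, or target (1,1) which the walk never revisits).
-- outside the precondition, e.g. on gen_fields(1, 1, 1): A does not finish within the time limit, B returns 1; on gen_fields(5, 0, 3): A does not finish within the time limit, B returns 26893306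
import Mathlib
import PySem

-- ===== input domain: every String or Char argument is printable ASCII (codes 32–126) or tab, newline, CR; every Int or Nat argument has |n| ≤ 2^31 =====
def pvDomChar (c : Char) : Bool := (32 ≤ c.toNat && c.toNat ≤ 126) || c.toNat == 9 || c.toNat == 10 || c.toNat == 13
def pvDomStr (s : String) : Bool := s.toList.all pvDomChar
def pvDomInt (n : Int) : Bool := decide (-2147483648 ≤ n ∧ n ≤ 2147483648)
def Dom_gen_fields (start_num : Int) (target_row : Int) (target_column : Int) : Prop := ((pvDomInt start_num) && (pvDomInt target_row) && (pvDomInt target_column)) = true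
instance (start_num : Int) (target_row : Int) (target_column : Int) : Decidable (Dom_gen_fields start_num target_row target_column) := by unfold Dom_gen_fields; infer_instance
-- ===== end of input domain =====

-- B replaces A's O((r+c)^2) diagonal walk by a closed-form cell index and modular exponentiation.

-- ===== PORT A =====
-- A's `while True` loop, transliterated with a fuel guard that only makes it total in Lean:
-- under Pre_ the fuel is provably enough and is never exhausted.
def genLoopA (tr tc : Int) : Nat → Int → Int → Int → Int
  | 0, _, _, cur => cur
  | fuel + 1, row, column, cur =>
    let p : Int × Int := if row = 1 then (1, column + 1) else (column + 1, row - 1)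
    let column' := p.1
    let row' := p.2
    let cur' := PySem.Int.mod (cur * 252533) 33554393
    if row' = tr ∧ column' = tc then cur'
    else genLoopA tr tc fuel row' column' cur'

def gen_fields (start_num : Int) (target_row : Int) (target_column : Int) : Int :=
  genLoopA target_row target_column
    ((target_row + target_column).toNat * (target_row + target_column).toNat + 4)
    1 1 start_num

-- ===== PORT B =====
-- pow(MULTIPLY_BY, steps, MOD_BY) ported as the stdlib contract for steps ≥ 0 (Pre_ guarantees steps ≥ 1)
def gen_fields_alt (start_num : Int) (target_row : Int) (target_column : Int) : Int :=
  let d := target_row + target_column - 2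
  let steps := PySem.Int.floordiv (d * (d + 1)) 2 + target_column - 1
  PySem.Int.mod (start_num * PySem.Int.mod (252533 ^ steps.toNat) 33554393) 33554393

-- ===== PRECONDITION & SPEC =====
-- Pre_ excludes exactly the inputs on which A loops forever: targets with row < 1 or column < 1
-- are never visited by the walk, and cell (1,1) is the start but is never revisited.
def Pre_gen_fields (start_num : Int) (target_row : Int) (target_column : Int) : Prop :=
  1 ≤ target_row ∧ 1 ≤ target_column ∧ ¬(target_row = 1 ∧ target_column = 1)
instance (start_num : Int) (target_row : Int) (target_column : Int) : Decidable (Pre_gen_fields start_num target_row target_column) := by unfold Pre_gen_fields; infer_instance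

def pvWitness_gen_fields : Int × Int × Int := (20151125, 3, 4)

def Spec_gen_fields (start_num : Int) (target_row : Int) (target_column : Int) (out : Int) : Prop := out = gen_fields_alt start_num target_row target_column
instance (start_num : Int) (target_row : Int) (target_column : Int) (out : Int) : Decidable (Spec_gen_fields start_num target_row target_column out) := by unfold Spec_gen_fields; infer_instance

-- ===== CLAIM (what is proved, stated in full; the proofs are below) =====
def Claim_equal_gen_fields : Prop := ∀ (start_num : Int) (target_row : Int) (target_column : Int), Dom_gen_fields start_num target_row target_column → Pre_gen_fields start_num target_row target_column → Spec_gen_fields start_num target_row target_column (gen_fields start_num target_row target_column)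

-- ===== LEMMAS AND PROOFS =====

-- Triangular numbers, recursively (T d = 0 + 1 + ... + d).
def triN : Nat → Nat
  | 0 => 0
  | d + 1 => triN d + (d + 1)

-- 0-based index of cell (a+1, b+1) in A's diagonal enumeration.
def idxN (a b : Nat) : Nat := triN (a + b) + b

theorem triN_mono : ∀ {m n : Nat}, m ≤ n → triN m ≤ triN n := by
  intro m n h
  induction n with
  | zero => simp [Nat.le_zero.mp h]
  | succ k ih =>
    rcases Nat.lt_or_ge m (k+1) with h1 | h1
    · exact le_trans (ih (Nat.lt_succ_iff.mp h1)) (by simp [triN])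
    · have : m = k + 1 := le_antisymm h h1
      subst this; rfl

theorem triN_two_mul : ∀ d : Nat, 2 * triN d = d * (d + 1) := by
  intro d
  induction d with
  | zero => rfl
  | succ k ih => simp [triN]; ring_nf; ring_nf at ih; omega

theorem triN_le_sq : ∀ d : Nat, triN d ≤ d * d := by
  intro d
  have := triN_two_mul d
  nlinarith

theorem idxN_inj {a b a' b' : Nat} (h : idxN a b = idxN a' b') : a = a' ∧ b = b' := by
  unfold idxN at h
  have key : a + b = a' + b' := by
    by_contra hne
    rcases Nat.lt_or_ge (a + b) (a' + b') with hlt | hge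
    · have h1 : triN (a + b) + b < triN (a + b + 1) := by simp only [triN]; omega
      have h2 : triN (a + b + 1) ≤ triN (a' + b') := triN_mono hlt
      omega
    · have hlt : a' + b' < a + b := by omega
      have h1 : triN (a' + b') + b' < triN (a' + b' + 1) := by simp only [triN]; omega
      have h2 : triN (a' + b' + 1) ≤ triN (a + b) := triN_mono hlt
      omega
  rw [key] at h
  omega

theorem genLoopA_step1 (tr tc cur : Int) (f : Nat) (col : Int) :
    genLoopA tr tc (f + 1) 1 col cur =
      if col + 1 = tr ∧ (1 : Int) = tc then PySem.Int.mod (cur * 252533) 33554393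
      else genLoopA tr tc f (col + 1) 1 (PySem.Int.mod (cur * 252533) 33554393) := by
  simp [genLoopA]

theorem genLoopA_step2 (tr tc cur : Int) (f : Nat) (row col : Int) (h : ¬ row = 1) :
    genLoopA tr tc (f + 1) row col cur =
      if row - 1 = tr ∧ col + 1 = tc then PySem.Int.mod (cur * 252533) 33554393
      else genLoopA tr tc f (row - 1) (col + 1) (PySem.Int.mod (cur * 252533) 33554393) := by
  simp [genLoopA, h]

theorem mod_fold (x : Int) (k : Nat) :
    PySem.Int.mod (PySem.Int.mod (x * 252533) 33554393 * 252533 ^ k) 33554393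
      = PySem.Int.mod (x * 252533 ^ (k + 1)) 33554393 := by
  rw [PySem.Int.mod_eq_emod_of_pos (by norm_num : (0:Int) < 33554393),
      PySem.Int.mod_eq_emod_of_pos (by norm_num : (0:Int) < 33554393),
      PySem.Int.mod_eq_emod_of_pos (by norm_num : (0:Int) < 33554393)]
  rw [Int.mul_emod, Int.emod_emod_of_dvd _ (dvd_refl _), ← Int.mul_emod]
  ring_nf

-- One step of A's walk advances the 0-based index by exactly 1; the loop invariant.
theorem genLoopA_run : ∀ (k : Nat) (a b ta tb : Nat) (cur : Int) (fuel : Nat),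
    1 ≤ k → k ≤ fuel → idxN ta tb = idxN a b + k →
    genLoopA ((ta : Int) + 1) ((tb : Int) + 1) fuel ((a : Int) + 1) ((b : Int) + 1) cur
      = PySem.Int.mod (cur * 252533 ^ k) 33554393 := by
  intro k
  induction k with
  | zero => omega
  | succ n ih =>
    intro a b ta tb cur fuel _ hfuel hidx
    obtain ⟨f, rfl⟩ : ∃ f, fuel = f + 1 := ⟨fuel - 1, by omega⟩
    rcases Nat.eq_zero_or_pos a with ha | ha
    · -- row = 1: next cell is (b+2, 1), i.e. a' = b+1, b' = 0
      subst ha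
      have hstep : idxN (b + 1) 0 = idxN 0 b + 1 := by
        simp [idxN, triN]; try omega
      simp only [Nat.cast_zero, zero_add]
      rw [genLoopA_step1]
      by_cases htarget : ta = b + 1 ∧ tb = 0
      · have : idxN ta tb = idxN 0 b + 1 := by rw [htarget.1, htarget.2]; exact hstep
        have hn : n = 0 := by omega
        subst hn
        rw [if_pos ⟨by push_cast [htarget.1]; ring, by simp [htarget.2]⟩]
        norm_num
      · have hn : 1 ≤ n := by
          rcases Nat.eq_zero_or_pos n with h0 | h1
          · exfalso
            have : idxN ta tb = idxN (b + 1) 0 := by omega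
            obtain ⟨e1, e2⟩ := idxN_inj this
            exact htarget ⟨e1, e2⟩
          · exact h1
        rw [if_neg (by omega)]
        have key := ih (b + 1) 0 ta tb (PySem.Int.mod (cur * 252533) 33554393) f hn (by omega)
          (by rw [hidx, hstep]; omega)
        simp only [Nat.cast_add, Nat.cast_one, Nat.cast_zero, zero_add] at key
        rw [key, mod_fold]
    · -- row > 1: next cell is (row-1, col+1), i.e. a' = a-1, b' = b+1
      obtain ⟨a0, rfl⟩ : ∃ a0, a = a0 + 1 := ⟨a - 1, by omega⟩
      have hstep : idxN a0 (b + 1) = idxN (a0 + 1) b + 1 := by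
        have e : a0 + (b + 1) = a0 + 1 + b := by omega
        simp only [idxN, e]
        omega
      rw [genLoopA_step2 _ _ _ _ _ _ (by push_cast; omega)]
      by_cases htarget : ta = a0 ∧ tb = b + 1
      · have : idxN ta tb = idxN (a0 + 1) b + 1 := by rw [htarget.1, htarget.2]; exact hstep
        have hn : n = 0 := by omega
        subst hn
        rw [if_pos ⟨by push_cast [htarget.1]; ring, by push_cast [htarget.2]; ring⟩]
        norm_num
      · have hn : 1 ≤ n := by
          rcases Nat.eq_zero_or_pos n with h0 | h1
          · exfalso
            have : idxN ta tb = idxN a0 (b + 1) := by omega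
            obtain ⟨e1, e2⟩ := idxN_inj this
            exact htarget ⟨e1, e2⟩
          · exact h1
        rw [if_neg (by push_cast; omega)]
        have key := ih a0 (b + 1) ta tb (PySem.Int.mod (cur * 252533) 33554393) f hn (by omega)
          (by rw [hidx, hstep]; omega)
        simp only [Nat.cast_add, Nat.cast_one] at key ⊢
        rw [show ((a0 : Int) + 1 + 1 - 1) = (a0 : Int) + 1 from by ring, key, mod_fold]

-- ===== VERDICT (by name: the statement is the Claim_ definition above) =====
theorem gen_fields_spec : Claim_equal_gen_fields := by
  intro s tr tc _ ⟨h1, h2, h3⟩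
  obtain ⟨ta, rfl⟩ : ∃ ta : Nat, tr = (ta : Int) + 1 := ⟨(tr - 1).toNat, by omega⟩
  obtain ⟨tb, rfl⟩ : ∃ tb : Nat, tc = (tb : Int) + 1 := ⟨(tc - 1).toNat, by omega⟩
  have hne : ¬(ta = 0 ∧ tb = 0) := by
    intro ⟨e1, e2⟩; exact h3 ⟨by simp [e1], by simp [e2]⟩
  have hNval : idxN ta tb = triN (ta + tb) + tb := rfl
  have hN1 : 1 ≤ idxN ta tb := by
    rcases Nat.eq_zero_or_pos tb with e | e
    · have hta : 1 ≤ ta := by omega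
      have ht : triN 1 ≤ triN (ta + tb) := triN_mono (by omega)
      simp [triN] at ht
      omega
    · omega
  have hfuel : idxN ta tb ≤ ((ta : Int) + 1 + ((tb : Int) + 1)).toNat * ((ta : Int) + 1 + ((tb : Int) + 1)).toNat + 4 := by
    have e : ((ta : Int) + 1 + ((tb : Int) + 1)).toNat = ta + tb + 2 := by omega
    rw [e]
    have hsq := triN_le_sq (ta + tb)
    have hle : idxN ta tb ≤ (ta + tb) * (ta + tb) + tb := by omega
    nlinarith
  show _ = gen_fields_alt _ _ _
  unfold gen_fields gen_fields_alt
  have hstart : idxN ta tb = idxN 0 0 + idxN ta tb := by simp [idxN, triN]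
  have hA := genLoopA_run (idxN ta tb) 0 0 ta tb s _ hN1 hfuel hstart
  simp only [Nat.cast_zero, zero_add] at hA
  rw [hA]
  have hd : (ta : Int) + 1 + ((tb : Int) + 1) - 2 = ((ta + tb : Nat) : Int) := by push_cast; ring
  rw [hd]
  show PySem.Int.mod (s * 252533 ^ idxN ta tb) 33554393 =
    PySem.Int.mod (s * PySem.Int.mod (252533 ^ (PySem.Int.floordiv (((ta + tb : Nat) : Int) * (((ta + tb : Nat) : Int) + 1)) 2 + ((tb : Int) + 1) - 1).toNat) 33554393) 33554393
  have hdd : ((ta + tb : Nat) : Int) * (((ta + tb : Nat) : Int) + 1) = ((2 * triN (ta + tb) : Nat) : Int) := by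
    rw [triN_two_mul]; push_cast; ring
  rw [hdd]
  have hfd : PySem.Int.floordiv ((2 * triN (ta + tb) : Nat) : Int) 2 = ((triN (ta + tb) : Nat) : Int) := by
    have h := PySem.Int.floordiv_natCast (2 * triN (ta + tb)) 2
    rw [Nat.mul_div_cancel_left _ (by norm_num)] at h
    exact_mod_cast h
  rw [hfd]
  have hsteps : (((triN (ta + tb) : Nat) : Int) + ((tb : Int) + 1) - 1).toNat = idxN ta tb := by
    rw [hNval]; omega
  rw [hsteps]
  rw [PySem.Int.mod_eq_emod_of_pos (by norm_num : (0:Int) < 33554393),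
      PySem.Int.mod_eq_emod_of_pos (by norm_num : (0:Int) < 33554393),
      PySem.Int.mod_eq_emod_of_pos (by norm_num : (0:Int) < 33554393)]
  conv_rhs => rw [Int.mul_emod, Int.emod_emod_of_dvd _ (dvd_refl _)]
  exact Int.mul_emod _ _ _
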